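-- pv_equiv track=rewrite | github.com/LenX21/jobeasy-algorithms-course | algorithms_elena/lesson_4.py | delete_fragment_for_loop
-- ===== SOURCE A (Python) =====
-- def delete_fragment_for_loop(s, char):
--     w = ''
--     h_found = False
--     for ele in s:
--         if ele in char:
--             h_found = not h_found
--             continue
--         if not h_found:
--             w += ele
--     return w
-- ===== SOURCE B (Python) =====
-- def delete_fragment_for_loop(s, char):
--     # Split s into segments at delimiter characters, then keep the
--     # even-indexed segments (text outside the toggled regions).
--     segments = []
--     current = []
--     for ele in s:
--         if ele in char:
--             segments.append(''.join(current))
--             current = []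
--         else:
--             current.append(ele)
--     segments.append(''.join(current))
--     return ''.join(segments[::2])
-- ===== Notes on version B (the rewrite author's own statement) =====
-- stated objective: alternative
-- what changed: Replaces the boolean toggle with conditional character append by a two-phase shape: split s into segments at delimiter characters, then join the even-indexed segments (segments[::2]).
import Mathlib
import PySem

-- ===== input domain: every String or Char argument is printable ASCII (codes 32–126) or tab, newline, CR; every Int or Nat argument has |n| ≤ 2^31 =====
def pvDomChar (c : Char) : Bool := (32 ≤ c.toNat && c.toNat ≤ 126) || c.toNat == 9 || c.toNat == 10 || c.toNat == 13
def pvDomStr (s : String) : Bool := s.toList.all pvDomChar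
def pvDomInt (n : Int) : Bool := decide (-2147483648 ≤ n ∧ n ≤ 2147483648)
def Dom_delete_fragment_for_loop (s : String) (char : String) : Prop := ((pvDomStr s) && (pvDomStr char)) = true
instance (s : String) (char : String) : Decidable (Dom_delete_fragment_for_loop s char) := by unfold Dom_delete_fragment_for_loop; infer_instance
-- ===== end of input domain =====

-- B replaces A's boolean toggle + conditional append by splitting s into segments
-- at delimiter characters and joining the even-indexed segments (alternative decomposition, same cost).

-- ===== PORT A =====
-- 'ele in char' for a single character ele is PySem.Chars.isIn [ele] char.toList
def pvA_loop (char : List Char) : List Char → List Char → Bool → List Char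
  | [], w, _ => w
  | e :: rest, w, h =>
    if PySem.Chars.isIn [e] char then pvA_loop char rest w (!h)
    else if !h then pvA_loop char rest (w ++ [e]) h
    else pvA_loop char rest w h

def delete_fragment_for_loop (s : String) (char : String) : String :=
  String.ofList (pvA_loop char.toList s.toList [] false)

-- ===== PORT B =====
-- the for-loop of Source B: flush current into segments on a delimiter, else extend current
def pvB_loop (char : List Char) : List Char → List Char → List (List Char) → List (List Char)
  | [], cur, segs => segs ++ [cur]
  | e :: rest, cur, segs =>
    if PySem.Chars.isIn [e] char then pvB_loop char rest [] (segs ++ [cur])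
    else pvB_loop char rest (cur ++ [e]) segs

-- ''.join(segments[::2])
def delete_fragment_for_loop_alt (s : String) (char : String) : String :=
  String.ofList (PySem.Chars.join []
    ((PySem.List.slice? (pvB_loop char.toList s.toList [] []) none none 2).getD []))

-- ===== PRECONDITION & SPEC =====
def Spec_delete_fragment_for_loop (s : String) (char : String) (out : String) : Prop := out = delete_fragment_for_loop_alt s char
instance (s : String) (char : String) (out : String) : Decidable (Spec_delete_fragment_for_loop s char out) := by unfold Spec_delete_fragment_for_loop; infer_instance

-- ===== CLAIM (what is proved, stated in full; the proofs are below) =====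
def Claim_equal_delete_fragment_for_loop : Prop := ∀ (s : String) (char : String), Dom_delete_fragment_for_loop s char → Spec_delete_fragment_for_loop s char (delete_fragment_for_loop s char)

-- ===== LEMMAS AND PROOFS =====

-- pure form of B's splitting loop
def pvSplit (char : List Char) : List Char → List Char → List (List Char)
  | [], cur => [cur]
  | e :: rest, cur =>
    if PySem.Chars.isIn [e] char then cur :: pvSplit char rest []
    else pvSplit char rest (cur ++ [e])

-- elements at even positions
def pvEveryOther {α : Type} : List α → List α
  | [] => []
  | [x] => [x]
  | x :: _ :: xs => x :: pvEveryOther xs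

theorem pvJoinNil_cons (x : List Char) (rest : List (List Char)) :
    PySem.Chars.join [] (x :: rest) = x ++ PySem.Chars.join [] rest := by
  cases rest with
  | nil => simp [PySem.Chars.join_singleton, PySem.Chars.join_nil]
  | cons y ys => rw [PySem.Chars.join_cons_cons]; simp

theorem pvB_loop_eq_split (char : List Char) (l : List Char) :
    ∀ cur segs, pvB_loop char l cur segs = segs ++ pvSplit char l cur := by
  induction l with
  | nil => intro cur segs; simp [pvB_loop, pvSplit]
  | cons e rest ih =>
    intro cur segs
    by_cases h : PySem.Chars.isIn [e] char
    · simp [pvB_loop, pvSplit, h, ih]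
    · simp [pvB_loop, pvSplit, h, ih]

theorem pvA_loop_eq (char : List Char) (l : List Char) :
    ∀ cur w,
      (pvA_loop char l (w ++ cur) false
         = w ++ PySem.Chars.join [] (pvEveryOther (pvSplit char l cur)))
      ∧ (pvA_loop char l w true
         = w ++ PySem.Chars.join [] (pvEveryOther (pvSplit char l cur).tail)) := by
  induction l with
  | nil =>
    intro cur w
    constructor
    · simp [pvA_loop, pvSplit, pvEveryOther, PySem.Chars.join_singleton]
    · simp [pvA_loop, pvSplit, pvEveryOther, PySem.Chars.join_nil]
  | cons e rest ih =>
    intro cur w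
    by_cases h : PySem.Chars.isIn [e] char
    · constructor
      · -- delimiter, kept state: toggle to true
        have := (ih [] (w ++ cur)).2
        simp [pvA_loop, pvSplit, h] at this ⊢
        cases hs : pvSplit char rest [] with
        | nil => simp [hs] at this; simp [pvEveryOther, this]
        | cons z zs =>
          simp [hs] at this
          simp [pvEveryOther, pvJoinNil_cons, this]
      · -- delimiter, deleted state: toggle to false
        have := (ih [] w).1
        simp [pvA_loop, pvSplit, h] at this ⊢
        simpa using this
    · constructor
      · have := (ih (cur ++ [e]) w).1
        simp [pvA_loop, pvSplit, h] at this ⊢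
        simpa using this
      · have := (ih (cur ++ [e]) w).2
        simp [pvA_loop, pvSplit, h] at this ⊢
        simpa using this

theorem pvFilterMap_even {α : Type} (xs : List α) :
    List.filterMap (fun k : Nat => xs[2 * k]?) (List.range ((xs.length + 1) / 2))
      = pvEveryOther xs := by
  induction xs using pvEveryOther.induct with
  | case1 => simp [pvEveryOther]
  | case2 x => simp [pvEveryOther, List.range_succ]
  | case3 x y xs ih =>
    have hlen : (x :: y :: xs).length = xs.length + 2 := by simp
    have hdiv : ((x :: y :: xs).length + 1) / 2 = (xs.length + 1) / 2 + 1 := by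
      rw [hlen]; omega
    rw [hdiv, List.range_succ_eq_map, List.filterMap_cons, List.filterMap_map]
    have h0 : (x :: y :: xs)[2 * 0]? = some x := by simp
    have hsucc : (fun k : Nat => (x :: y :: xs)[2 * k]?) ∘ Nat.succ
        = fun k : Nat => xs[2 * k]? := by
      funext k
      have : 2 * Nat.succ k = 2 * k + 1 + 1 := by omega
      simp [Function.comp, this]
    rw [hsucc, ih]
    simp [pvEveryOther]

theorem pvSlice_two {α : Type} (xs : List α) :
    PySem.List.slice? xs none none 2 = some (pvEveryOther xs) := by
  simp only [PySem.List.slice?, PySem.List.sliceIndices]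
  norm_num
  have hc : (if 0 < xs.length then (((xs.length : Int) + 2 - 1) / 2).toNat else 0)
      = (xs.length + 1) / 2 := by split_ifs <;> omega
  rw [hc, ← pvFilterMap_even xs]
  apply List.filterMap_congr
  intro k _
  have : ((2 * (k : Int)).toNat) = 2 * k := by omega
  rw [this]

-- ===== VERDICT (by name: the statement is the Claim_ definition above) =====
theorem delete_fragment_for_loop_spec : Claim_equal_delete_fragment_for_loop := by
  intro s char _
  unfold Spec_delete_fragment_for_loop delete_fragment_for_loop delete_fragment_for_loop_alt
  rw [pvB_loop_eq_split, pvSlice_two]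
  have := (pvA_loop_eq char.toList s.toList [] []).1
  simp at this
  simp [this]
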